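-- pv_equiv track=rewrite | github.com/gamxu/CPU-SchedulingAlgo | LeastRecentlyUsed.py | getMostNotUse
-- ===== SOURCE A (Python) =====
-- def getMostNotUse(pTable,strArr):
--   '''
--   Input: pTable: page table array, maxf: Array of references string
--   Operation: find the most not used string
--   Output: victim: victim string which will be replace
--   '''
--   maxCount=0
--   victim=0
--   for i in pTable:
--     ctn=0
--     for j in strArr[::-1]:
--       if j!=i:
--         ctn=ctn+1
--       else:
--         break
--     if ctn>=maxCount:
--       maxCount=ctn
--       victim=i
--   return victim
-- ===== SOURCE B (Python) =====
-- def getMostNotUse(pTable, strArr):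
--     # Backward elimination sieve: walk the reference string from the end,
--     # deleting pages from a candidate set as they are referenced; the page
--     # whose deletion empties the set is the least recently used.  Pages never
--     # referenced survive the whole sieve; among those, the last one in table
--     # order is the victim (matching A's >= tie-breaking).
--     if not pTable:
--         return 0
--     cands = set(pTable)
--     for j in reversed(strArr):
--         if j in cands:
--             cands.remove(j)
--             if not cands:
--                 return j
--     for p in reversed(pTable):
--         if p in cands:
--             return p
-- ===== Notes on version B (the rewrite author's own statement) =====
-- stated objective: faster
-- what changed: Replaced A's per-page backward count over the reference string by a single backward elimination sieve: scan the reference string once from the end deleting pages from a candidate set, returning the page whose deletion empties the set, or the last surviving (never-referenced) page in table order.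
import Mathlib
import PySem

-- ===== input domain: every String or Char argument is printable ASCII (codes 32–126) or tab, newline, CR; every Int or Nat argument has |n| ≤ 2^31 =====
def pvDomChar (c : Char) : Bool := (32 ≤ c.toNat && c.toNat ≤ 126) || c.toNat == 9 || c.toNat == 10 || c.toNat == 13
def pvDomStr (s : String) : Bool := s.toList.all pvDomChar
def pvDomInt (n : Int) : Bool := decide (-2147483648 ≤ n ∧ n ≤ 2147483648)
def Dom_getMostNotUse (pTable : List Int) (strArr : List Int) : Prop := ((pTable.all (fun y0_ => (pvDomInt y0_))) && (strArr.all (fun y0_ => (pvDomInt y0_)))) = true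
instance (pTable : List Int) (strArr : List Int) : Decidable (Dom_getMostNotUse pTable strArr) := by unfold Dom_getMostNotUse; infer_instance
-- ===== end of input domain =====

-- B replaces A's per-page backward count over the reference string by a single backward
-- elimination sieve over a candidate set (a different, asymptotically faster algorithm).

-- ===== PORT A =====
-- inner loop of A: 'ctn=0; for j in strArr[::-1]: if j!=i: ctn=ctn+1 else: break'
def ctnLoop (i : Int) : List Int → Int
  | [] => 0
  | j :: rest => if j ≠ i then ctnLoop i rest + 1 else 0

def getMostNotUse (pTable : List Int) (strArr : List Int) : Int :=
  (pTable.foldl (fun (st : Int × Int) i =>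
      let ctn := ctnLoop i strArr.reverse
      if ctn ≥ st.1 then (ctn, i) else st) ((0 : Int), (0 : Int))).2

-- ===== PORT B =====
-- 'for j in reversed(strArr): if j in cands: cands.remove(j); if not cands: return j'
def sieve : PySem.Set Int → List Int → Int ⊕ PySem.Set Int
  | cands, [] => Sum.inr cands
  | cands, j :: rest =>
    if PySem.Set.contains cands j then
      let c := PySem.Set.discard cands j
      if c.isEmpty then Sum.inl j else sieve c rest
    else sieve cands rest

def getMostNotUse_alt (pTable : List Int) (strArr : List Int) : Int :=
  if pTable.isEmpty then 0
  else
    match sieve (PySem.Set.ofList pTable) strArr.reverse with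
    | Sum.inl j => j
    | Sum.inr cands =>
      -- 'for p in reversed(pTable): if p in cands: return p'; the fall-through
      -- (Python's implicit None) is unreachable since cands ⊆ pTable is nonempty
      (pTable.reverse.find? (fun p => PySem.Set.contains cands p)).getD 0

-- ===== PRECONDITION & SPEC =====
def Spec_getMostNotUse (pTable : List Int) (strArr : List Int) (out : Int) : Prop := out = getMostNotUse_alt pTable strArr
instance (pTable : List Int) (strArr : List Int) (out : Int) : Decidable (Spec_getMostNotUse pTable strArr out) := by unfold Spec_getMostNotUse; infer_instance

-- ===== CLAIM (what is proved, stated in full; the proofs are below) =====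
def Claim_equal_getMostNotUse : Prop := ∀ (pTable : List Int) (strArr : List Int), Dom_getMostNotUse pTable strArr → Spec_getMostNotUse pTable strArr (getMostNotUse pTable strArr)

-- ===== LEMMAS AND PROOFS =====

-- fI rs i = index (from the end of strArr) of the last use of i, rs.length if unused
def fI (rs : List Int) (i : Int) : Nat := rs.findIdx (fun j => j == i)

-- MA rs l = the maximal fI over l (A's maxCount);  VA rs l = A's victim
def MA (rs : List Int) (l : List Int) : Nat := l.foldl (fun m i => max m (fI rs i)) 0

def VA (rs : List Int) (l : List Int) : Int :=
  (l.reverse.find? (fun i => fI rs i == MA rs l)).getD 0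

theorem ctn_eq (i : Int) (xs : List Int) : ctnLoop i xs = ((fI xs i : Nat) : Int) := by
  induction xs with
  | nil => simp [ctnLoop, fI]
  | cons j rest ih =>
    by_cases h : j = i
    · simp [ctnLoop, h, fI, List.findIdx_cons]
    · have hb : (j == i) = false := by simp [h]
      simp only [ctnLoop, if_pos h, fI, List.findIdx_cons, hb, cond_false] at *
      rw [ih]
      push_cast; ring

theorem fI_cons_self (j : Int) (rest : List Int) : fI (j :: rest) j = 0 := by
  simp [fI, List.findIdx_cons]

theorem fI_cons_ne (j a : Int) (rest : List Int) (h : a ≠ j) :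
    fI (j :: rest) a = fI rest a + 1 := by
  have : (j == a) = false := by simp [Ne.symm h]
  simp [fI, List.findIdx_cons, this]

theorem fI_eq_length_iff (rs : List Int) (a : Int) : fI rs a = rs.length ↔ a ∉ rs := by
  unfold fI
  rw [List.findIdx_eq_length]
  constructor
  · intro h ha; have := h a ha; simp at this
  · intro h x hx; simp; rintro rfl; exact h hx

theorem fI_le_length (rs : List Int) (a : Int) : fI rs a ≤ rs.length :=
  List.findIdx_le_length

theorem MA_append (rs : List Int) (l : List Int) (x : Int) :
    MA rs (l ++ [x]) = max (MA rs l) (fI rs x) := by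
  simp [MA, List.foldl_append]

theorem foldl_max_le (rs : List Int) (l : List Int) (m k : Nat) (hm : m ≤ k)
    (h : ∀ i ∈ l, fI rs i ≤ k) : l.foldl (fun m i => max m (fI rs i)) m ≤ k := by
  induction l generalizing m with
  | nil => simpa using hm
  | cons a t ih =>
    simp only [List.foldl_cons]
    exact ih _ (Nat.max_le.mpr ⟨hm, h a (by simp)⟩) (fun i hi => h i (by simp [hi]))

theorem MA_le_of (rs : List Int) (l : List Int) (k : Nat)
    (h : ∀ i ∈ l, fI rs i ≤ k) : MA rs l ≤ k :=
  foldl_max_le rs l 0 k (Nat.zero_le k) h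

theorem le_foldl_max (rs : List Int) (l : List Int) (m : Nat) :
    m ≤ l.foldl (fun m i => max m (fI rs i)) m := by
  induction l generalizing m with
  | nil => simp
  | cons a t ih =>
    simp only [List.foldl_cons]
    exact le_trans (Nat.le_max_left _ _) (ih _)

theorem foldl_max_ge (rs : List Int) (l : List Int) (i : Int) :
    ∀ m : Nat, i ∈ l → fI rs i ≤ l.foldl (fun m i => max m (fI rs i)) m := by
  induction l with
  | nil => intro m hi; cases hi
  | cons a t ih =>
    intro m hi
    simp only [List.foldl_cons]
    rcases List.mem_cons.mp hi with rfl | h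
    · exact le_trans (Nat.le_max_right _ _) (le_foldl_max rs t _)
    · exact ih _ h

theorem MA_ge (rs : List Int) (l : List Int) (i : Int) (hi : i ∈ l) : fI rs i ≤ MA rs l :=
  foldl_max_ge rs l i 0 hi

theorem MA_mem (rs : List Int) (l : List Int) (h : l ≠ []) : ∃ i ∈ l, fI rs i = MA rs l := by
  induction l using List.reverseRecOn with
  | nil => exact absurd rfl h
  | append_singleton ys y ih =>
    rcases eq_or_ne ys [] with rfl | hys
    · exact ⟨y, by simp, by simp [MA, fI]⟩
    · rw [MA_append]
      rcases ih hys with ⟨i, hi, hfi⟩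
      rcases Nat.le_total (fI rs y) (MA rs ys) with hle | hle
      · exact ⟨i, by simp [hi], by rw [hfi, Nat.max_eq_left hle]⟩
      · exact ⟨y, by simp, by rw [Nat.max_eq_right hle]⟩

theorem A_char (rs : List Int) (l : List Int) (h : l ≠ []) :
    l.foldl (fun (st : Int × Int) i =>
        let ctn := ctnLoop i rs
        if ctn ≥ st.1 then (ctn, i) else st) ((0 : Int), (0 : Int))
      = ((MA rs l : Int), VA rs l) := by
  induction l using List.reverseRecOn with
  | nil => exact absurd rfl h
  | append_singleton ys y ih =>
    rcases eq_or_ne ys [] with rfl | hys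
    · simp only [List.nil_append, List.foldl_cons, List.foldl_nil, ctn_eq]
      have hge : ((fI rs y : Nat) : Int) ≥ (0 : Int) := Int.natCast_nonneg _
      rw [if_pos hge]
      simp [MA, VA, fI]
    · rw [List.foldl_append, ih hys, List.foldl_cons, List.foldl_nil]
      simp only [ctn_eq]
      rw [MA_append]
      by_cases hge : MA rs ys ≤ fI rs y
      · have : ((fI rs y : Nat) : Int) ≥ ((MA rs ys : Nat) : Int) := by exact_mod_cast hge
        rw [if_pos this, Nat.max_eq_right hge]
        unfold VA
        rw [MA_append, Nat.max_eq_right hge]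
        simp
      · rw [not_le] at hge
        have : ¬ ((fI rs y : Nat) : Int) ≥ ((MA rs ys : Nat) : Int) := by
          omega
        rw [if_neg this, Nat.max_eq_left (Nat.le_of_lt hge)]
        unfold VA
        rw [MA_append, Nat.max_eq_left (Nat.le_of_lt hge)]
        have hne : (fI rs y == MA rs ys) = false := by
          simp; omega
        simp [hne]

theorem find?_congr_mem {p q : Int → Bool} (l : List Int) (h : ∀ a ∈ l, p a = q a) :
    l.find? p = l.find? q := by
  induction l with
  | nil => rfl
  | cons a t ih =>
    have ha := h a (by simp)
    simp only [List.find?_cons, ← ha]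
    cases hpa : p a
    · exact ih (fun b hb => h b (by simp [hb]))
    · rfl

theorem sieve_char (xs : List Int) : ∀ (cands : List Int), cands.Nodup → cands ≠ [] →
    sieve cands xs =
      (if ∀ c ∈ cands, c ∈ xs then Sum.inl (xs.getD (MA xs cands) 0)
       else Sum.inr (cands.filter (fun c => decide (c ∉ xs)))) := by
  induction xs with
  | nil =>
    intro cands hnd hne
    rcases List.exists_mem_of_ne_nil cands hne with ⟨c0, hc0⟩
    rw [if_neg (by intro hall; exact (List.not_mem_nil (a := c0)) (hall c0 hc0))]
    simp [sieve, List.filter_eq_self.mpr]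
  | cons j rest ih =>
    intro cands hnd hne
    by_cases hj : j ∈ cands
    · rw [show sieve cands (j :: rest) =
          (if PySem.Set.contains cands j then
            (if (PySem.Set.discard cands j).isEmpty then Sum.inl j
             else sieve (PySem.Set.discard cands j) rest)
           else sieve cands rest) from rfl]
      rw [if_pos ((PySem.Set.contains_iff _ _).mpr hj)]
      have hdisc : PySem.Set.discard cands j = cands.filter (fun y => !(y == j)) := rfl
      by_cases hc : (PySem.Set.discard cands j).isEmpty
      · rw [if_pos hc]
        -- cands = [j] up to membership: every member equals j
        have hall : ∀ a ∈ cands, a = j := by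
          intro a ha
          by_contra hne'
          have : a ∈ PySem.Set.discard cands j := by
            rw [hdisc]; simp [ha, hne']
          rw [List.isEmpty_iff] at hc
          rw [hc] at this
          exact List.not_mem_nil this
        rw [if_pos (fun c hc' => by rw [hall c hc']; exact List.mem_cons_self)]
        have hMA : MA (j :: rest) cands = 0 := by
          have := MA_le_of (j :: rest) cands 0 (fun i hi => by
            rw [hall i hi, fI_cons_self])
          omega
        rw [hMA]
        simp
      · rw [if_neg hc]
        have hcnd : (PySem.Set.discard cands j).Nodup := by
          rw [hdisc]; exact hnd.filter _
        have hcne : (PySem.Set.discard cands j) ≠ [] := by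
          intro h0; rw [h0] at hc; simp at hc
        have hmemc : ∀ a, a ∈ PySem.Set.discard cands j ↔ a ∈ cands ∧ a ≠ j := by
          intro a; rw [hdisc]; simp
        rw [ih _ hcnd hcne]
        have hcond : (∀ a ∈ cands, a ∈ j :: rest) ↔ (∀ a ∈ PySem.Set.discard cands j, a ∈ rest) := by
          constructor
          · intro h a ha
            rcases (hmemc a).mp ha with ⟨ha', hne'⟩
            rcases List.mem_cons.mp (h a ha') with rfl | hr
            · exact absurd rfl hne'
            · exact hr
          · intro h a ha
            by_cases haj : a = j
            · simp [haj]
            · exact List.mem_cons_of_mem _ (h a ((hmemc a).mpr ⟨ha, haj⟩))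
        by_cases hP : ∀ a ∈ PySem.Set.discard cands j, a ∈ rest
        · rw [if_pos hP, if_pos (hcond.mpr hP)]
          -- MA (j :: rest) cands = MA rest c + 1
          have hMA : MA (j :: rest) cands = MA rest (PySem.Set.discard cands j) + 1 := by
            apply Nat.le_antisymm
            · apply MA_le_of
              intro i hi
              by_cases hij : i = j
              · rw [hij, fI_cons_self]; omega
              · rw [fI_cons_ne j i rest hij]
                have := MA_ge rest _ i ((hmemc i).mpr ⟨hi, hij⟩)
                omega
            · rcases MA_mem rest _ hcne with ⟨i, hi, hfi⟩
              have hij : i ≠ j := ((hmemc i).mp hi).2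
              have : fI (j :: rest) i = MA rest (PySem.Set.discard cands j) + 1 := by
                rw [fI_cons_ne j i rest hij, hfi]
              rw [← this]
              exact MA_ge (j :: rest) cands i ((hmemc i).mp hi).1
          rw [hMA]
          simp [List.getD]
        · rw [if_neg hP, if_neg (fun h => hP (hcond.mp h))]
          congr 1
          rw [hdisc, List.filter_filter]
          apply List.filter_congr
          intro a ha
          by_cases haj : a = j
          · simp [haj]
          · simp [haj]
    · rw [show sieve cands (j :: rest) =
          (if PySem.Set.contains cands j then
            (if (PySem.Set.discard cands j).isEmpty then Sum.inl j
             else sieve (PySem.Set.discard cands j) rest)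
           else sieve cands rest) from rfl]
      have : ¬ (PySem.Set.contains cands j = true) := fun h => hj ((PySem.Set.contains_iff _ _).mp h)
      rw [if_neg this]
      rw [ih cands hnd hne]
      have hcond : (∀ a ∈ cands, a ∈ j :: rest) ↔ (∀ a ∈ cands, a ∈ rest) := by
        constructor
        · intro h a ha
          rcases List.mem_cons.mp (h a ha) with rfl | hr
          · exact absurd ha hj
          · exact hr
        · intro h a ha; exact List.mem_cons_of_mem _ (h a ha)
      by_cases hP : ∀ a ∈ cands, a ∈ rest
      · rw [if_pos hP, if_pos (hcond.mpr hP)]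
        have hMA : MA (j :: rest) cands = MA rest cands + 1 := by
          apply Nat.le_antisymm
          · apply MA_le_of
            intro i hi
            have hij : i ≠ j := fun h => hj (h ▸ hi)
            rw [fI_cons_ne j i rest hij]
            have := MA_ge rest cands i hi
            omega
          · rcases MA_mem rest cands hne with ⟨i, hi, hfi⟩
            have hij : i ≠ j := fun h => hj (h ▸ hi)
            have : fI (j :: rest) i = MA rest cands + 1 := by
              rw [fI_cons_ne j i rest hij, hfi]
            rw [← this]
            exact MA_ge (j :: rest) cands i hi
        rw [hMA]
        simp [List.getD]
      · rw [if_neg hP, if_neg (fun h => hP (hcond.mp h))]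
        congr 1
        apply List.filter_congr
        intro a ha
        have hij : a ≠ j := fun h => hj (h ▸ ha)
        simp [hij]

-- MA only depends on membership
theorem MA_congr_mem (rs : List Int) (l l' : List Int) (h : ∀ a, a ∈ l ↔ a ∈ l') :
    MA rs l = MA rs l' := by
  apply Nat.le_antisymm
  · exact MA_le_of rs l _ (fun i hi => MA_ge rs l' i ((h i).mp hi))
  · exact MA_le_of rs l' _ (fun i hi => MA_ge rs l i ((h i).mpr hi))

-- ===== VERDICT (by name: the statement is the Claim_ definition above) =====
theorem getMostNotUse_spec : Claim_equal_getMostNotUse := by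
  intro pTable strArr _
  unfold Spec_getMostNotUse getMostNotUse getMostNotUse_alt
  rcases eq_or_ne pTable [] with rfl | hne
  · simp
  · set rs := strArr.reverse with hrs
    rw [A_char rs pTable hne]
    have hempty : pTable.isEmpty = false := by
      rw [List.isEmpty_eq_false_iff]; exact hne
    rw [hempty]
    simp only [Bool.false_eq_true, if_false]
    set cands0 : List Int := PySem.Set.ofList pTable with hc0
    have hnd : cands0.Nodup := PySem.Set.nodup_ofList pTable
    have hmem : ∀ a, a ∈ cands0 ↔ a ∈ pTable := fun a => PySem.Set.mem_ofList pTable a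
    have hc0ne : cands0 ≠ [] := by
      rcases List.exists_mem_of_ne_nil pTable hne with ⟨p, hp⟩
      intro h0
      have := (hmem p).mpr hp
      rw [h0] at this
      exact List.not_mem_nil this
    rw [sieve_char rs cands0 hnd hc0ne]
    by_cases hall : ∀ c ∈ cands0, c ∈ rs
    · rw [if_pos hall]
      have hallP : ∀ i ∈ pTable, i ∈ rs := fun i hi => hall i ((hmem i).mpr hi)
      have hMAeq : MA rs cands0 = MA rs pTable := MA_congr_mem rs cands0 pTable hmem
      rw [hMAeq]
      set m := MA rs pTable with hm
      -- A's victim: the last element of pTable whose fI equals m; it is rs[m]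
      rcases MA_mem rs pTable hne with ⟨i, hi, hfi⟩
      have hsome : (pTable.reverse.find? (fun i => fI rs i == m)).isSome := by
        rw [List.find?_isSome]
        exact ⟨i, List.mem_reverse.mpr hi, by simp [hfi, hm]⟩
      rcases Option.isSome_iff_exists.mp hsome with ⟨i₀, h₀⟩
      have hpi₀ : fI rs i₀ = m := by
        have := List.find?_some h₀; simpa using this
      have hmemi₀ : i₀ ∈ pTable := List.mem_reverse.mp (List.mem_of_find?_eq_some h₀)
      have hrs : i₀ ∈ rs := hallP i₀ hmemi₀
      have hlt : fI rs i₀ < rs.length := by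
        unfold fI
        rw [List.findIdx_lt_length]
        exact ⟨i₀, hrs, by simp⟩
      have hmlt : m < rs.length := by omega
      have h2 : rs[fI rs i₀]'hlt = i₀ := by
        have := @List.findIdx_getElem _ (fun j => j == i₀) rs hlt
        simpa [fI] using this
      have hval : rs.getD m 0 = i₀ := by
        rw [← hpi₀, List.getD_eq_getElem rs 0 hlt]
        exact h2
      unfold VA
      simp only [← hm]
      rw [h₀, hval]
      rfl
    · rw [if_neg hall]
      rcases not_forall.mp hall with ⟨p, hp⟩
      rw [Classical.not_imp] at hp
      obtain ⟨hpc, hprs⟩ := hp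
      -- the maximum is rs.length
      have hMAp : MA rs pTable = rs.length := by
        apply Nat.le_antisymm
        · exact MA_le_of rs pTable _ (fun i _ => fI_le_length rs i)
        · have : fI rs p = rs.length := (fI_eq_length_iff rs p).mpr hprs
          rw [← this]
          exact MA_ge rs pTable p ((hmem p).mp hpc)
      unfold VA
      rw [hMAp]
      congr 1
      apply find?_congr_mem
      intro a ha
      have haP : a ∈ pTable := List.mem_reverse.mp ha
      have : (a ∈ cands0.filter (fun c => decide (c ∉ rs))) ↔ a ∉ rs := by
        simp [List.mem_filter, (hmem a).mpr haP]
      by_cases hars : a ∈ rs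
      · have h1 : fI rs a ≠ rs.length := fun h => ((fI_eq_length_iff rs a).mp h) hars
        simp only [PySem.Set.contains_eq_listContains]
        simp [h1, hars]
      · have h1 : fI rs a = rs.length := (fI_eq_length_iff rs a).mpr hars
        simp only [PySem.Set.contains_eq_listContains]
        simp [h1]
        exact ⟨(hmem a).mpr haP, hars⟩
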